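-- pv_equiv track=rewrite | github.com/shehan-hetti/Zips-Law-distribution-in-food-domain | suomi24_process_year.py | find_foods_in_lemmas
-- ===== SOURCE A (Python) =====
-- def find_foods_in_lemmas(lemmas, lex, max_n):
--     """
--     Longest-first n-gram scan over lemmas using the lexicon.
--     Returns a set of FOODIDs.
--     """
--     found = set()
--     lemmas_length = len(lemmas)
--     i = 0
--     while i < lemmas_length:
--         matched_any = False
--         for n in range(min(max_n, lemmas_length - i), 0, -1):
--             ngram = tuple(lemmas[i:i + n])
--             if ngram in lex:
--                 found.update(lex[ngram])
--                 i += n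
--                 matched_any = True
--                 break
--         if not matched_any:
--             i += 1
--     return found
-- ===== SOURCE B (Python) =====
-- def find_foods_in_lemmas(lemmas, lex, max_n):
--     """
--     Same greedy longest-first n-gram scan, but driven by an index of the
--     lexicon keyed on the first token: at each position only the keys that
--     start with the current lemma are inspected (no per-length slicing and
--     hashing of every n-gram).
--     """
--     pairs = [(key[0], (len(key), key, ids)) for key, ids in lex.items() if key]
--     index = {}
--     for t, e in pairs:
--         index.setdefault(t, []).append(e)
--     found = set()
--     L = len(lemmas)
--     i = 0
--     while i < L:
--         limit = min(max_n, L - i)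
--         best = None
--         for (k, key, ids) in index.get(lemmas[i], []):
--             if k <= limit and (best is None or best[0] < k) and tuple(lemmas[i:i + k]) == key:
--                 best = (k, ids)
--         if best is None:
--             i += 1
--         else:
--             found.update(best[1])
--             i += best[0]
--     return found
-- ===== Notes on version B (the rewrite author's own statement) =====
-- stated objective: faster
-- what changed: Instead of probing the lexicon dict with every n-gram length at each position (building and hashing up to max_n tuple slices per position), B builds a one-time index of the lexicon keyed on the first token of each key and, at each position, scans only the candidate keys that start with the current lemma, keeping the longest match.
import Mathlib
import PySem

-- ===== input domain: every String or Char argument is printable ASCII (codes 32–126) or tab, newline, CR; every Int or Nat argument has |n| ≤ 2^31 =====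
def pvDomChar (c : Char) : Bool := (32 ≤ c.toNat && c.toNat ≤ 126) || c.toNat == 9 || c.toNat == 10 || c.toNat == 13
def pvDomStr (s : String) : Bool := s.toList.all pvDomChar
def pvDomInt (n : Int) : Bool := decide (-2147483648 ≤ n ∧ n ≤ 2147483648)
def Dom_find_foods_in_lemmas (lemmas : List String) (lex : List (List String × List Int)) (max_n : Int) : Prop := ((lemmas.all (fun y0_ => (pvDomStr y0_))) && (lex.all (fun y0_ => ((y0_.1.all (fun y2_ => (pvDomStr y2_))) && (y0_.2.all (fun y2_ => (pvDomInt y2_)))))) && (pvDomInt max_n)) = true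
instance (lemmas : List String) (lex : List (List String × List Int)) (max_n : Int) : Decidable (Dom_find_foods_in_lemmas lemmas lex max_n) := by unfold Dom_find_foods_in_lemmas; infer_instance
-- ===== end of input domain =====

-- B replaces A's per-position descending n-gram probes of the dictionary by a one-time
-- index of the lexicon keyed on the first token of each key; only candidates starting
-- with the current lemma are compared at a position (objective: faster).

-- ===== PORT A =====
-- inner 'for n in range(min(max_n, L-i), 0, -1): … break' loop of A
def pvInnerA (lemmas : List String) (lex : List (List String × List Int)) (i : Int) :
    List Int → Option (Int × List Int)
  | [] => none
  | n :: rest =>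
    match (PySem.Dict.mk lex).get? (PySem.List.slice lemmas (some i) (some (i + n))) with
    | some ids => some (n, ids)
    | none => pvInnerA lemmas lex i rest

-- 'while i < lemmas_length' loop of A; fuel = lemmas_length suffices since i grows by ≥ 1 each pass
def pvLoopA (lemmas : List String) (lex : List (List String × List Int)) (max_n : Int) :
    Nat → Int → PySem.Set Int → PySem.Set Int
  | 0, _, found => found
  | fuel+1, i, found =>
    if i < (lemmas.length : Int) then
      match pvInnerA lemmas lex i
          (PySem.List.pyRange (min max_n ((lemmas.length : Int) - i)) 0 (-1)) with
      | some (n, ids) => pvLoopA lemmas lex max_n fuel (i + n) (PySem.Set.update found ids)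
      | none => pvLoopA lemmas lex max_n fuel (i + 1) found
    else found

def find_foods_in_lemmas (lemmas : List String) (lex : List (List String × List Int)) (max_n : Int) : List Int :=
  pvLoopA lemmas lex max_n lemmas.length 0 PySem.Set.empty

-- ===== PORT B =====
-- '[(key[0], (len(key), key, ids)) for key, ids in lex.items() if key]'
def pvPairsB (lex : List (List String × List Int)) : List (String × (Int × List String × List Int)) :=
  lex.filterMap (fun e => match e.1 with
    | [] => none
    | t :: _ => some (t, ((e.1.length : Int), e.1, e.2)))

-- 'index.setdefault(t, []).append(e)' loop
def pvIndexB (lex : List (List String × List Int)) :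
    PySem.Dict String (List (Int × List String × List Int)) :=
  (pvPairsB lex).foldl (fun d p => d.modify p.1 [] (fun v => v ++ [p.2])) PySem.Dict.empty

-- '(best is None or best[0] < k)'
def pvBestOk (best : Option (Int × List Int)) (k : Int) : Bool :=
  match best with | none => true | some b => decide (b.1 < k)

-- body of B's 'for (k, key, ids) in index.get(lemmas[i], [])' candidate loop
def pvStepB (lemmas : List String) (i limit : Int)
    (best : Option (Int × List Int)) (e : Int × List String × List Int) : Option (Int × List Int) :=
  if decide (e.1 ≤ limit) && pvBestOk best e.1 &&
      (PySem.List.slice lemmas (some i) (some (i + e.1)) == e.2.1)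
  then some (e.1, e.2.2) else best

-- B's 'while i < L' loop
def pvLoopB (lemmas : List String) (idx : PySem.Dict String (List (Int × List String × List Int)))
    (max_n : Int) : Nat → Int → PySem.Set Int → PySem.Set Int
  | 0, _, found => found
  | fuel+1, i, found =>
    if i < (lemmas.length : Int) then
      match (idx.getD (PySem.List.pyGetD lemmas i "") []).foldl
          (pvStepB lemmas i (min max_n ((lemmas.length : Int) - i))) none with
      | some (k, ids) => pvLoopB lemmas idx max_n fuel (i + k) (PySem.Set.update found ids)
      | none => pvLoopB lemmas idx max_n fuel (i + 1) found
    else found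

def find_foods_in_lemmas_alt (lemmas : List String) (lex : List (List String × List Int)) (max_n : Int) : List Int :=
  pvLoopB lemmas (pvIndexB lex) max_n lemmas.length 0 PySem.Set.empty

-- ===== PRECONDITION & SPEC =====
def Spec_find_foods_in_lemmas (lemmas : List String) (lex : List (List String × List Int)) (max_n : Int) (out : List Int) : Prop := out = find_foods_in_lemmas_alt lemmas lex max_n
instance (lemmas : List String) (lex : List (List String × List Int)) (max_n : Int) (out : List Int) : Decidable (Spec_find_foods_in_lemmas lemmas lex max_n out) := by unfold Spec_find_foods_in_lemmas; infer_instance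

-- ===== CLAIM (what is proved, stated in full; the proofs are below) =====
def Claim_equal_find_foods_in_lemmas : Prop := ∀ (lemmas : List String) (lex : List (List String × List Int)) (max_n : Int), Dom_find_foods_in_lemmas lemmas lex max_n → Spec_find_foods_in_lemmas lemmas lex max_n (find_foods_in_lemmas lemmas lex max_n)

-- ===== LEMMAS AND PROOFS =====

-- the candidates B's index stores under first token t, in lexicon order
def pvCands (lex : List (List String × List Int)) (t : String) : List (Int × List String × List Int) :=
  (lex.filter (fun e => e.1.head? == some t)).map (fun e => ((e.1.length : Int), e.1, e.2))

theorem pv_dict_find (lex : List (List String × List Int)) (q : List String) :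
    (PySem.Dict.mk lex).get? q = (lex.find? (fun e => e.1 == q)).map (·.2) := by
  induction lex with
  | nil => simp [PySem.Dict.get?]
  | cons e rest ih =>
    rw [List.find?_cons]
    cases e with
    | mk k v =>
      rw [PySem.Dict.get?_mk_cons]
      by_cases h : (k == q) = true
      · simp [h]
      · simp [h] at *; simpa [h] using ih

theorem pv_pairs_filter (lex : List (List String × List Int)) (t : String) :
    ((pvPairsB lex).filter (fun p => p.1 == t)).map (fun p => p.2) = pvCands lex t := by
  induction lex with
  | nil => simp [pvPairsB, pvCands]
  | cons e rest ih =>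
    cases e with
    | mk k v =>
      cases k with
      | nil => simpa [pvPairsB, pvCands, List.filterMap_cons] using ih
      | cons t0 ks =>
        by_cases h : t0 = t
        · subst h
          simp [pvPairsB, pvCands] at *
          exact ih
        · simp [pvPairsB, pvCands, h] at *
          exact ih

theorem pv_getD_index (lex : List (List String × List Int)) (t : String) :
    (pvIndexB lex).getD t [] = pvCands lex t := by
  unfold pvIndexB
  rw [PySem.Dict.getD_foldl_modify_append, pv_pairs_filter]
  simp [PySem.Dict.getD, PySem.Dict.empty, PySem.Dict.get?]

theorem pv_cands_shape (lex : List (List String × List Int)) (t : String) :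
    ∀ c ∈ pvCands lex t, c.1 = (c.2.1.length : Int) ∧ 1 ≤ c.1 := by
  intro c hc
  unfold pvCands at hc
  obtain ⟨e, he, rfl⟩ := List.mem_map.1 hc
  have := List.of_mem_filter he
  rcases e with ⟨k, v⟩
  cases k with
  | nil => simp at this
  | cons a ks => constructor <;> simp

theorem pv_cands_find (lex : List (List String × List Int)) (t : String) (q : List String)
    (hq : q.head? = some t) :
    (pvCands lex t).find? (fun c => c.2.1 == q) =
      (lex.find? (fun e => e.1 == q)).map (fun e => ((e.1.length : Int), e.1, e.2)) := by
  induction lex with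
  | nil => simp [pvCands]
  | cons e rest ih =>
    rcases e with ⟨k, v⟩
    by_cases hk : k = q
    · subst hk
      simp [pvCands, hq]
    · by_cases hh : k.head? = some t
      · simp [pvCands, hh, hk] at *
        exact ih
      · simp [pvCands, hh, hk] at *
        exact ih

theorem pvStepB_skip (lemmas : List String) (i limit : Int) (b : Option (Int × List Int))
    (e : Int × List String × List Int)
    (h : ¬(e.1 ≤ limit ∧ PySem.List.slice lemmas (some i) (some (i + e.1)) = e.2.1)) :
    pvStepB lemmas i limit b e = b := by
  unfold pvStepB
  split
  · rename_i hcnd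
    simp at hcnd
    exact absurd ⟨hcnd.1.1, hcnd.2⟩ h
  · rfl

theorem pv_fold_id (lemmas : List String) (i limit : Int)
    (cs : List (Int × List String × List Int)) (b : Option (Int × List Int))
    (h : ∀ c ∈ cs, ¬(c.1 ≤ limit ∧ PySem.List.slice lemmas (some i) (some (i + c.1)) = c.2.1)) :
    cs.foldl (pvStepB lemmas i limit) b = b := by
  induction cs generalizing b with
  | nil => rfl
  | cons c rest ih =>
    rw [List.foldl_cons, pvStepB_skip lemmas i limit b c (h c (by simp))]
    exact ih b (fun c' hc' => h c' (List.mem_cons_of_mem _ hc'))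

theorem pvStepB_stay (lemmas : List String) (i limit : Int) (ids : List Int)
    (c : Int × List String × List Int) :
    pvStepB lemmas i limit (some (limit, ids)) c = some (limit, ids) := by
  simp [pvStepB, pvBestOk]

theorem pv_fold_stay (lemmas : List String) (i limit : Int)
    (cs : List (Int × List String × List Int)) (ids : List Int) :
    cs.foldl (pvStepB lemmas i limit) (some (limit, ids)) = some (limit, ids) := by
  induction cs with
  | nil => rfl
  | cons c rest ih => rw [List.foldl_cons, pvStepB_stay, ih]

theorem pv_fold_hit (lemmas : List String) (i limit : Int) (q : List String)
    (hq : q = PySem.List.slice lemmas (some i) (some (i + limit)))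
    (hql : (q.length : Int) = limit) :
    ∀ (cs : List (Int × List String × List Int)) (b : Option (Int × List Int)),
      (∀ p, b = some p → p.1 < limit) →
      (∀ c ∈ cs, c.1 = (c.2.1.length : Int)) →
      ∀ c₀, cs.find? (fun c => c.2.1 == q) = some c₀ →
      cs.foldl (pvStepB lemmas i limit) b = some (limit, c₀.2.2) := by
  intro cs
  induction cs with
  | nil => intro b _ _ c₀ h; simp at h
  | cons c rest ih =>
    intro b hb hlen c₀ hfind
    rw [List.find?_cons] at hfind
    by_cases hcq : c.2.1 = q
    · -- c is the first match: it wins and the state then never changes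
      have hc1 : c.1 = limit := by
        have := hlen c (by simp)
        rw [this, hcq, hql]
      have hok : pvBestOk b c.1 = true := by
        rcases b with _ | p
        · rfl
        · have := hb p rfl
          simp [pvBestOk]
          omega
      have hcnd : (decide (c.1 ≤ limit) && pvBestOk b c.1 &&
          (PySem.List.slice lemmas (some i) (some (i + c.1)) == c.2.1)) = true := by
        simp [hc1, ← hq, hcq]
        exact hc1 ▸ hok
      have hcond : pvStepB lemmas i limit b c = some (limit, c.2.2) := by
        unfold pvStepB
        rw [if_pos hcnd, hc1]
      have hc0 : c₀ = c := by simp [hcq] at hfind; exact hfind.symm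
      subst hc0
      rw [List.foldl_cons, hcond, pv_fold_stay]
    · simp only [show (c.2.1 == q) = false by simpa using hcq] at hfind
      -- c does not match q; whatever it does, the state rank stays below limit
      have hstep : ∀ p', pvStepB lemmas i limit b c = some p' → p'.1 < limit := by
        intro p' hp'
        unfold pvStepB at hp'
        split at hp'
        · rename_i hcnd
          simp at hcnd
          have hne : c.1 ≠ limit := by
            intro he
            exact hcq (by rw [← hcnd.2, he, ← hq])
          cases hp'
          simp
          omega
        · exact hb p' hp'
      rw [List.foldl_cons]
      exact ih _ hstep (fun c' hc' => hlen c' (by simp [hc'])) c₀ hfind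

theorem pv_fold_congr (lemmas : List String) (i k : Int)
    (cs : List (Int × List String × List Int)) (b : Option (Int × List Int))
    (hmiss : ∀ c ∈ cs, c.2.1 ≠ PySem.List.slice lemmas (some i) (some (i + k))) :
    cs.foldl (pvStepB lemmas i k) b = cs.foldl (pvStepB lemmas i (k - 1)) b := by
  apply PySem.List.foldl_congr_mem
  intro acc c hc
  unfold pvStepB
  by_cases hck : c.1 = k
  · have hsl : (PySem.List.slice lemmas (some i) (some (i + c.1)) == c.2.1) = false := by
      simp [hck]
      exact fun he => (hmiss c hc) he.symm
    simp [hsl]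
  · have : (decide (c.1 ≤ k)) = (decide (c.1 ≤ k - 1)) := by
      by_cases h : c.1 ≤ k - 1 <;> simp [h] <;> omega
    rw [this]

theorem pv_innerA_mem (lemmas : List String) (lex : List (List String × List Int)) (i : Int)
    (ns : List Int) (n : Int) (ids : List Int)
    (h : pvInnerA lemmas lex i ns = some (n, ids)) : n ∈ ns := by
  induction ns with
  | nil => simp [pvInnerA] at h
  | cons m rest ih =>
    unfold pvInnerA at h
    revert h
    cases (PySem.Dict.mk lex).get? (PySem.List.slice lemmas (some i) (some (i + m))) with
    | some ids' => intro h; cases h; simp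
    | none => intro h; exact List.mem_cons_of_mem _ (ih h)

-- the n-gram at position i of length k, for 0 ≤ i < L and 1 ≤ k: cons form
theorem pv_slice_cons (lemmas : List String) (i k : Int) (h0 : 0 ≤ i)
    (hL : i < (lemmas.length : Int)) (hk : 1 ≤ k) :
    PySem.List.slice lemmas (some i) (some (i + k)) =
      lemmas[i.toNat]'(by omega) ::
        (lemmas.drop (i.toNat + 1)).take (k.toNat - 1) := by
  rw [PySem.List.slice_toNat lemmas (a := i) (b := i + k) h0 (by omega)]
  have hiL : i.toNat < lemmas.length := by omega
  rw [List.drop_eq_getElem_cons hiL]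
  have : (i + k).toNat - i.toNat = (k.toNat - 1) + 1 := by omega
  rw [this, List.take_succ_cons]

theorem pv_slice_len (lemmas : List String) (i k : Int) (h0 : 0 ≤ i)
    (hk : 1 ≤ k) (hb : k ≤ (lemmas.length : Int) - i) :
    (((PySem.List.slice lemmas (some i) (some (i + k))).length : Int)) = k := by
  rw [PySem.List.slice_toNat lemmas (a := i) (b := i + k) h0 (by omega)]
  simp
  omega

theorem pv_main_fold (lemmas : List String) (lex : List (List String × List Int)) (i : Int)
    (h0 : 0 ≤ i) (hL : i < (lemmas.length : Int)) :
    ∀ k : Nat, (k : Int) ≤ (lemmas.length : Int) - i →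
      (pvCands lex (PySem.List.pyGetD lemmas i "")).foldl (pvStepB lemmas i (k : Int)) none =
        pvInnerA lemmas lex i (PySem.List.pyRange (k : Int) 0 (-1)) := by
  intro k
  induction k with
  | zero =>
    intro _
    rw [PySem.List.pyRange_neg_one_eq_nil (by norm_num)]
    show _ = none
    apply pv_fold_id
    intro c hc
    have := (pv_cands_shape lex _ c hc).2
    intro hcon
    omega
  | succ k ih =>
    intro hk
    have hk1 : (1 : Int) ≤ ((k+1 : Nat) : Int) := by exact_mod_cast Nat.succ_le_succ (Nat.zero_le k)
    rw [PySem.List.pyRange_neg_one_cons (by omega)]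
    unfold pvInnerA
    have ht : PySem.List.pyGetD lemmas i "" = lemmas[i.toNat]'(by omega) :=
      PySem.List.pyGetD_eq_getElem lemmas "" h0 hL
    have hhead : (PySem.List.slice lemmas (some i) (some (i + ((k+1 : Nat) : Int)))).head? =
        some (PySem.List.pyGetD lemmas i "") := by
      rw [pv_slice_cons lemmas i _ h0 hL hk1, ht]
      rfl
    cases hget : (PySem.Dict.mk lex).get? (PySem.List.slice lemmas (some i) (some (i + ((k+1 : Nat) : Int)))) with
    | some ids =>
      rw [pv_dict_find] at hget
      obtain ⟨e₀, hfind, hids⟩ : ∃ e₀, lex.find? (fun e => e.1 == (PySem.List.slice lemmas (some i) (some (i + ((k+1 : Nat) : Int))))) = some e₀ ∧ e₀.2 = ids := by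
        cases hf : lex.find? (fun e => e.1 == (PySem.List.slice lemmas (some i) (some (i + ((k+1 : Nat) : Int))))) with
        | none => rw [hf] at hget; simp at hget
        | some e₀ => rw [hf] at hget; simp at hget; exact ⟨e₀, rfl, hget⟩
      have hcf := pv_cands_find lex (PySem.List.pyGetD lemmas i "") _ hhead
      rw [hfind] at hcf
      have := pv_fold_hit lemmas i ((k+1 : Nat) : Int) _ rfl
        (pv_slice_len lemmas i _ h0 hk1 hk)
        (pvCands lex (PySem.List.pyGetD lemmas i "")) none (by simp)
        (fun c hc => (pv_cands_shape lex _ c hc).1)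
        (((e₀.1.length : Int), e₀.1, e₀.2)) hcf
      rw [this, hids]
    | none =>
      rw [pv_dict_find] at hget
      have hnone : lex.find? (fun e => e.1 == (PySem.List.slice lemmas (some i) (some (i + ((k+1 : Nat) : Int))))) = none := by
        cases hf : lex.find? (fun e => e.1 == (PySem.List.slice lemmas (some i) (some (i + ((k+1 : Nat) : Int))))) with
        | none => rfl
        | some e₀ => rw [hf] at hget; simp at hget
      have hcf := pv_cands_find lex (PySem.List.pyGetD lemmas i "") _ hhead
      rw [hnone] at hcf
      simp only [Option.map_none] at hcf
      have hmiss : ∀ c ∈ pvCands lex (PySem.List.pyGetD lemmas i ""),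
          c.2.1 ≠ PySem.List.slice lemmas (some i) (some (i + ((k+1 : Nat) : Int))) := by
        intro c hc hcon
        have := List.find?_eq_none.1 hcf c hc
        simp [hcon] at this
      rw [pv_fold_congr lemmas i _ _ _ hmiss]
      have hcast : ((k+1 : Nat) : Int) - 1 = (k : Int) := by push_cast; ring
      rw [hcast]
      exact ih (by omega)

theorem pv_inner_eq (lemmas : List String) (lex : List (List String × List Int)) (max_n : Int)
    (i : Int) (h0 : 0 ≤ i) (hL : i < (lemmas.length : Int)) :
    ((pvIndexB lex).getD (PySem.List.pyGetD lemmas i "") []).foldl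
        (pvStepB lemmas i (min max_n ((lemmas.length : Int) - i))) none =
      pvInnerA lemmas lex i (PySem.List.pyRange (min max_n ((lemmas.length : Int) - i)) 0 (-1)) := by
  rw [pv_getD_index]
  set limit := min max_n ((lemmas.length : Int) - i) with hlim
  by_cases hpos : 0 < limit
  · have : limit = ((limit.toNat : Nat) : Int) := by omega
    rw [this]
    exact pv_main_fold lemmas lex i h0 hL limit.toNat (by omega)
  · rw [PySem.List.pyRange_neg_one_eq_nil (by omega)]
    show _ = none
    apply pv_fold_id
    intro c hc
    have := (pv_cands_shape lex _ c hc).2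
    intro hcon
    omega

theorem pv_loops_eq (lemmas : List String) (lex : List (List String × List Int)) (max_n : Int) :
    ∀ (fuel : Nat) (i : Int) (found : PySem.Set Int), 0 ≤ i →
      pvLoopA lemmas lex max_n fuel i found = pvLoopB lemmas (pvIndexB lex) max_n fuel i found := by
  intro fuel
  induction fuel with
  | zero => intro i found _; rfl
  | succ fuel ih =>
    intro i found h0
    unfold pvLoopA pvLoopB
    by_cases hi : i < (lemmas.length : Int)
    · rw [if_pos hi, if_pos hi, pv_inner_eq lemmas lex max_n i h0 hi]
      cases hres : pvInnerA lemmas lex i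
          (PySem.List.pyRange (min max_n ((lemmas.length : Int) - i)) 0 (-1)) with
      | none => exact ih (i + 1) found (by omega)
      | some p =>
        rcases p with ⟨n, ids⟩
        have hn : 0 < n := by
          have := pv_innerA_mem lemmas lex i _ n ids hres
          exact (PySem.List.mem_pyRange_neg_one.1 this).1
        exact ih (i + n) (PySem.Set.update found ids) (by omega)
    · rw [if_neg hi, if_neg hi]

-- ===== VERDICT (by name: the statement is the Claim_ definition above) =====
theorem find_foods_in_lemmas_spec : Claim_equal_find_foods_in_lemmas := by
  intro lemmas lex max_n _
  unfold Spec_find_foods_in_lemmas find_foods_in_lemmas find_foods_in_lemmas_alt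
  exact pv_loops_eq lemmas lex max_n lemmas.length 0 PySem.Set.empty le_rfl
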